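-- pv_equiv track=rewrite | github.com/zalavariandris/MyMaxScripts | SceneGraph.py | suffix_duplicates
-- ===== SOURCE A (Python) =====
-- from collections import Counter
--
-- def suffix_duplicates(names):
--     counter = Counter()
--     result = []
--
--     # append index suffix
--     for name in names:
--         counter[name] += 1
--         result.append(f"{name}({counter[name]})")
--
--     # remove suffix if occures only once
--     for i, name in enumerate(names):
--         if counter[name]<2:
--             result[i] = name
--     return result
-- ===== SOURCE B (Python) =====
-- def suffix_duplicates(names):
--     positions = {}
--     for i, name in enumerate(names):
--         positions.setdefault(name, []).append(i)
--     result = list(names)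
--     for name, idxs in positions.items():
--         if len(idxs) > 1:
--             for k, i in enumerate(idxs, 1):
--                 result[i] = f"{name}({k})"
--     return result
-- ===== Notes on version B (the rewrite author's own statement) =====
-- stated objective: alternative
-- what changed: B groups the positions of each name into a dict in one pass and then scatters 1-based suffixes onto the positions of names occurring more than once, leaving other slots as the bare name; A instead suffixes every element with a running counter and then patches singleton slots back in a second enumerate pass.
import Mathlib
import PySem

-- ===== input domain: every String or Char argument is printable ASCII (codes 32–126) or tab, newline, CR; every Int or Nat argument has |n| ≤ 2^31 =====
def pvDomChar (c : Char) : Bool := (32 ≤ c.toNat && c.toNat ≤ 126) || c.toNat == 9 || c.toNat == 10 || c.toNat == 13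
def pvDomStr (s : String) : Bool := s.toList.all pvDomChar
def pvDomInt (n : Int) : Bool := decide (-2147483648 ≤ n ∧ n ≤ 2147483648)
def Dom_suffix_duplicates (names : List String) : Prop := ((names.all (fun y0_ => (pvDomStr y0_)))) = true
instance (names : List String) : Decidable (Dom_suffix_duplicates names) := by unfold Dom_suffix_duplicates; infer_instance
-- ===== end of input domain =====

-- B groups each name's positions into a dict and scatters suffixes onto duplicate slots,
-- instead of A's suffix-everything running-counter pass plus index-patching second pass.

-- ===== PORT A =====
-- loop body of A's first pass: counter[name] += 1; result.append(f"{name}({counter[name]})")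
def pvAStep (st : PySem.Dict String Int × List String) (name : String) :
    PySem.Dict String Int × List String :=
  let counter := st.1.modify name 0 (· + 1)
  (counter, st.2 ++ [name ++ "(" ++ PySem.Int.toStr (counter.getD name 0) ++ ")"])

def suffix_duplicates (names : List String) : List String :=
  let st := names.foldl pvAStep (PySem.Dict.empty, [])
  -- second pass: for i, name in enumerate(names): if counter[name] < 2: result[i] = name
  (PySem.List.enumerate names 0).foldl
    (fun (result : List String) p =>
      if st.1.getD p.2 0 < 2 then result.set p.1.toNat p.2 else result)
    st.2

-- ===== PORT B =====
-- positions.setdefault(name, []).append(i)  (setdefault-then-append = modify with append)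
def pvGroup (d : PySem.Dict String (List Int)) (p : Int × String) :
    PySem.Dict String (List Int) :=
  d.modify p.2 [] (· ++ [p.1])

-- if len(idxs) > 1: for k, i in enumerate(idxs, 1): result[i] = f"{name}({k})"
def pvScatter (result : List String) (q : String × List Int) : List String :=
  if 1 < q.2.length then
    (PySem.List.enumerate q.2 1).foldl
      (fun r e => r.set e.2.toNat (q.1 ++ "(" ++ PySem.Int.toStr e.1 ++ ")")) result
  else result

def suffix_duplicates_alt (names : List String) : List String :=
  let positions := (PySem.List.enumerate names 0).foldl pvGroup PySem.Dict.empty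
  -- result = list(names); then scatter over positions.items()
  positions.items.foldl pvScatter names

-- ===== PRECONDITION & SPEC =====
def Spec_suffix_duplicates (names : List String) (out : List String) : Prop := out = suffix_duplicates_alt names
instance (names : List String) (out : List String) : Decidable (Spec_suffix_duplicates names out) := by unfold Spec_suffix_duplicates; infer_instance

-- ===== CLAIM (what is proved, stated in full; the proofs are below) =====
def Claim_equal_suffix_duplicates : Prop := ∀ (names : List String), Dom_suffix_duplicates names → Spec_suffix_duplicates names (suffix_duplicates names)

-- ===== LEMMAS AND PROOFS =====

-- ---------- A-side characterisation ----------

-- counter update step of A's loop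
def pvStep (d : PySem.Dict String Int) (n : String) : PySem.Dict String Int :=
  d.modify n 0 (· + 1)

-- the list A's first pass appends, as a structural recursion
def pvPass1 : List String → PySem.Dict String Int → List String
  | [], _ => []
  | n :: l, d =>
      (n ++ "(" ++ PySem.Int.toStr ((pvStep d n).getD n 0) ++ ")") :: pvPass1 l (pvStep d n)

lemma pass1_fold (l : List String) (d : PySem.Dict String Int) (acc : List String) :
    l.foldl pvAStep (d, acc) = (l.foldl pvStep d, acc ++ pvPass1 l d) := by
  induction l generalizing d acc with
  | nil => simp [pvPass1]
  | cons n l ih => simp [pvAStep, pvPass1, pvStep, ih]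

lemma length_pass1 (l : List String) (d : PySem.Dict String Int) :
    (pvPass1 l d).length = l.length := by
  induction l generalizing d with
  | nil => simp [pvPass1]
  | cons n l ih => simp [pvPass1, ih]

-- element i of A's first pass: name with its running count in the prefix of length i+1
lemma pass1_get (l : List String) (d : PySem.Dict String Int) (i : Nat) (h : i < l.length) :
    (pvPass1 l d)[i]'(by rw [length_pass1]; exact h)
      = l[i] ++ "(" ++ PySem.Int.toStr (d.getD l[i] 0 + ((l.take (i+1)).count l[i] : Int)) ++ ")" := by
  induction l generalizing d i with
  | nil => simp at h
  | cons n l ih =>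
      cases i with
      | zero =>
          simp [pvPass1, pvStep, PySem.Dict.getD_modify_self]
      | succ i =>
          have hi : i < l.length := by simpa using h
          simp only [pvPass1, List.getElem_cons_succ, List.take_succ_cons, List.count_cons]
          rw [ih _ i hi]
          by_cases hn : l[i] = n
          · simp only [pvStep, hn, PySem.Dict.getD_modify_self, beq_self_eq_true, if_true]
            congr 1
            congr 1
            congr 1
            push_cast
            ring
          · have hn' : ¬ n = l[i] := fun e => hn e.symm
            simp [pvStep, PySem.Dict.getD_modify, hn, hn']

-- A's second pass, applied to a list of the right length, is a pointwise zip
lemma patch_zip (c : PySem.Dict String Int) (l : List String) :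
    ∀ (pre res : List String), res.length = l.length →
    (PySem.List.enumerate l (pre.length : Int)).foldl
      (fun (result : List String) p =>
        if c.getD p.2 0 < 2 then result.set p.1.toNat p.2 else result)
      (pre ++ res)
    = pre ++ List.zipWith (fun n r => if c.getD n 0 < 2 then n else r) l res := by
  induction l with
  | nil =>
      intro pre res h
      simp at h
      simp [PySem.List.enumerate_nil, h]
  | cons n l ih =>
      intro pre res h
      cases res with
      | nil => simp at h
      | cons r res' =>
        simp only [List.length_cons] at h
        rw [PySem.List.enumerate_cons, List.foldl_cons]
        have hset : ∀ x : String, (pre ++ r :: res').set ((pre.length : Int)).toNat x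
            = (pre ++ [x]) ++ res' := by
          intro x
          rw [Int.toNat_natCast, List.set_append]
          simp
        by_cases hc : c.getD n 0 < 2
        · simp only [hc, if_pos, hset n]
          have := ih (pre ++ [n]) res' (by omega)
          simp only [List.length_append, List.length_cons, List.length_nil] at this ⊢
          push_cast at this ⊢
          rw [this]
          simp [List.zipWith, hc]
        · simp only [hc, if_neg, not_false_iff]
          have hrw : pre ++ r :: res' = (pre ++ [r]) ++ res' := by simp
          rw [hrw]
          have := ih (pre ++ [r]) res' (by omega)
          simp only [List.length_append, List.length_cons, List.length_nil] at this ⊢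
          push_cast at this ⊢
          rw [this]
          simp [List.zipWith, hc]

lemma patch_zip0 (c : PySem.Dict String Int) (l res : List String) (h : res.length = l.length) :
    (PySem.List.enumerate l 0).foldl
      (fun (result : List String) p =>
        if c.getD p.2 0 < 2 then result.set p.1.toNat p.2 else result)
      res
    = List.zipWith (fun n r => if c.getD n 0 < 2 then n else r) l res := by
  have h2 := patch_zip c l [] res h
  simpa using h2

-- ---------- B-side characterisation ----------

-- positions of c within l, 0-based offset s (what B's dict stores under key c)
def pvIdxs (l : List String) (c : String) (s : Int) : List Int :=
  ((PySem.List.enumerate l s).filter (fun p => p.2 == c)).map (·.1)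

lemma pvIdxs_cons (n : String) (l : List String) (c : String) (s : Int) :
    pvIdxs (n :: l) c s = (if n = c then [s] else []) ++ pvIdxs l c (s+1) := by
  by_cases h : n = c <;> simp [pvIdxs, PySem.List.enumerate_cons, h]

lemma length_pvIdxs (l : List String) (c : String) : ∀ s, (pvIdxs l c s).length = l.count c := by
  induction l with
  | nil => intro s; simp [pvIdxs, PySem.List.enumerate_nil]
  | cons n l ih =>
      intro s
      rw [pvIdxs_cons, List.count_cons]
      by_cases h : n = c <;> simp [h, ih]

lemma mem_pvIdxs (l : List String) (c : String) : ∀ (s x : Int), x ∈ pvIdxs l c s →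
    ∃ (k : Nat) (hk : k < l.length), x = s + k ∧ l[k] = c := by
  induction l with
  | nil => intro s x hx; simp [pvIdxs, PySem.List.enumerate_nil] at hx
  | cons n l ih =>
      intro s x hx
      rw [pvIdxs_cons] at hx
      rcases List.mem_append.1 hx with h1 | h2
      · by_cases hn : n = c
        · simp [hn] at h1
          exact ⟨0, by simp, by simpa using h1, by simpa using hn⟩
        · simp [hn] at h1
      · obtain ⟨k, hk, hx, hc⟩ := ih (s+1) x h2
        exact ⟨k+1, by simpa using hk, by omega, by simpa using hc⟩

lemma pairwise_pvIdxs (l : List String) (c : String) (s : Int) :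
    (pvIdxs l c s).Pairwise (· < ·) := by
  have h1 := PySem.List.pairwise_lt_enumerate l s
  have h2 := h1.filter (fun p => p.2 == c)
  exact (List.pairwise_map).2 (by exact h2)

-- first position of x in a list (the rank a scattered write receives)
def pvRank (x : Int) : List Int → Option Nat
  | [] => none
  | y :: l => if y = x then some 0 else (pvRank x l).map (· + 1)

lemma pvRank_eq_none (x : Int) : ∀ l : List Int, x ∉ l → pvRank x l = none := by
  intro l
  induction l with
  | nil => intro _; rfl
  | cons y l ih =>
      intro h
      simp only [List.mem_cons, not_or] at h
      simp [pvRank, Ne.symm h.1, ih h.2]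

lemma pvRank_pvIdxs (c : String) : ∀ (l : List String) (s : Int) (j : Nat) (hj : j < l.length),
    l[j] = c → pvRank (s + j) (pvIdxs l c s) = some ((l.take j).count c) := by
  intro l
  induction l with
  | nil => intro s j hj; simp at hj
  | cons n l ih =>
      intro s j hj hc
      rw [pvIdxs_cons]
      cases j with
      | zero =>
          simp only [List.getElem_cons_zero] at hc
          simp [hc, pvRank]
      | succ j =>
          have hj' : j < l.length := by simpa using hj
          have hx : s + (j+1 : Nat) = (s+1) + j := by push_cast; ring
          have hrec := ih (s+1) j hj' (by simpa using hc)
          by_cases hn : n = c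
          · have hne : s ≠ s + ((j:Nat)+1 : Nat) := by push_cast; omega
            simp only [hn, if_pos rfl, List.cons_append, List.nil_append,
              if_neg hne, hx, List.take_succ_cons, List.count_cons, hn]
            have hne2 : s ≠ s + 1 + (j : Int) := by omega
            simp [pvRank, hne2, hrec]
          · simp only [hn, if_neg, List.nil_append, hx, List.take_succ_cons,
              List.count_cons]
            simpa [hn] using hrec

-- the inner scatter loop, pointwise: position j receives g(s + rank of j) if j is listed
lemma scatter_inner_get (g : Int → String) (idxs : List Int) :
    ∀ (s : Int) (r : List String),
    idxs.Pairwise (· < ·) → (∀ x ∈ idxs, 0 ≤ x ∧ x.toNat < r.length) →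
    ∀ (j : Nat) (hj : j < r.length),
    ∀ (hj2 : j < ((PySem.List.enumerate idxs s).foldl
        (fun r e => r.set e.2.toNat (g e.1)) r).length),
    ((PySem.List.enumerate idxs s).foldl (fun r e => r.set e.2.toNat (g e.1)) r)[j]'hj2
      = match pvRank (j : Int) idxs with
        | some k => g (s + k)
        | none => r[j]'hj := by
  induction idxs with
  | nil => intro s r _ _ j hj hj2; simp [PySem.List.enumerate_nil, pvRank]
  | cons i idxs ih =>
      intro s r hpw hbd j hj hj2
      simp only [PySem.List.enumerate_cons, List.foldl_cons] at hj2 ⊢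
      have hi := hbd i (List.mem_cons_self ..)
      have hlen : (r.set i.toNat (g s)).length = r.length := by simp
      have hbd' : ∀ x ∈ idxs, 0 ≤ x ∧ x.toNat < (r.set i.toNat (g s)).length := by
        intro x hx; rw [hlen]; exact hbd x (List.mem_cons_of_mem _ hx)
      have hrec := ih (s+1) (r.set i.toNat (g s)) hpw.of_cons hbd'
        j (by omega) hj2
      rw [hrec]
      by_cases hij : i = (j : Int)
      · have hnotmem : (j : Int) ∉ idxs := by
          intro hmem
          have := (List.pairwise_cons.1 hpw).1 _ hmem
          omega
        rw [pvRank_eq_none _ _ hnotmem]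
        simp only [pvRank, hij, if_pos rfl]
        have : i.toNat = j := by omega
        simp [this]
      · simp only [pvRank, hij, if_neg]
        have hne : i.toNat ≠ j := by omega
        cases hcase : pvRank (j : Int) idxs with
        | none => simp [hcase, List.getElem_set_ne hne]
        | some k =>
            simp only [hcase, Option.map_some]
            congr 1
            push_cast
            ring

-- step of the outer scatter fold, for a key c with its true position list
lemma scatter_step_get (names : List String) (c : String) (res : List String)
    (hlen : res.length = names.length) (j : Nat) (hj : j < names.length)
    (hj2 : j < (pvScatter res (c, pvIdxs names c 0)).length) :
    (pvScatter res (c, pvIdxs names c 0))[j]'hj2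
      = if names[j] = c ∧ 2 ≤ names.count c
        then names[j] ++ "(" ++ PySem.Int.toStr (((names.take (j+1)).count names[j] : Int)) ++ ")"
        else res[j]'(by omega) := by
  unfold pvScatter at hj2 ⊢
  by_cases hdup : 1 < (pvIdxs names c 0).length
  · have hcnt : 2 ≤ names.count c := by
      have := length_pvIdxs names c 0; omega
    simp only [hdup, if_pos] at hj2 ⊢
    have hbd : ∀ x ∈ pvIdxs names c 0, 0 ≤ x ∧ x.toNat < res.length := by
      intro x hx
      obtain ⟨k, hk, hxe, _⟩ := mem_pvIdxs names c 0 x hx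
      constructor <;> omega
    rw [scatter_inner_get (fun k => c ++ "(" ++ PySem.Int.toStr k ++ ")") (pvIdxs names c 0)
      1 res (pairwise_pvIdxs names c 0) hbd j (by omega) hj2]
    by_cases hc : names[j] = c
    · rw [show (j : Int) = 0 + (j : Nat) by ring,
        pvRank_pvIdxs c names 0 j hj hc]
      simp only [hc, hcnt, and_self, if_pos]
      have htake : (names.take (j+1)).count c = (names.take j).count c + 1 := by
        rw [List.take_succ, List.getElem?_eq_getElem hj]
        simp [List.count_append, hc]
      rw [htake]
      congr 2
      push_cast
      ring
    · have hnot : (j : Int) ∉ pvIdxs names c 0 := by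
        intro hmem
        obtain ⟨k, hk, hxe, hke⟩ := mem_pvIdxs names c 0 _ hmem
        have : k = j := by omega
        exact hc (this ▸ hke)
      rw [pvRank_eq_none _ _ hnot]
      simp [hc]
  · have hcnt : ¬ 2 ≤ names.count c := by
      have := length_pvIdxs names c 0; omega
    simp [hdup, hcnt]

lemma scatter_len (res : List String) (q : String × List Int) :
    (pvScatter res q).length = res.length := by
  unfold pvScatter
  split
  · generalize PySem.List.enumerate q.2 1 = L
    induction L generalizing res with
    | nil => rfl
    | cons e L ih => simp [ih]
  · rfl

-- the outer scatter fold over any list of keys (each paired with its true positions)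
lemma scatter_fold_get (names : List String) (cs : List String) :
    ∀ (res : List String) (hlen : res.length = names.length)
    (j : Nat) (hj : j < names.length)
    (hj2 : j < ((cs.map (fun c => (c, pvIdxs names c 0))).foldl pvScatter res).length),
    ((cs.map (fun c => (c, pvIdxs names c 0))).foldl pvScatter res)[j]'hj2
      = if names[j] ∈ cs ∧ 2 ≤ names.count names[j]
        then names[j] ++ "(" ++ PySem.Int.toStr (((names.take (j+1)).count names[j] : Int)) ++ ")"
        else res[j]'(by omega) := by
  induction cs with
  | nil => intro res hlen j hj hj2; simp
  | cons c cs ih =>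
      intro res hlen j hj hj2
      simp only [List.map_cons, List.foldl_cons] at hj2 ⊢
      have hlen' : (pvScatter res (c, pvIdxs names c 0)).length = names.length := by
        rw [scatter_len]; exact hlen
      rw [ih _ hlen' j hj hj2]
      rw [scatter_step_get names c res hlen j hj (by rw [scatter_len]; omega)]
      by_cases hcnt : 2 ≤ names.count names[j]
      · by_cases hmem : names[j] ∈ cs
        · simp [hmem, hcnt, List.mem_cons]
        · by_cases hc : names[j] = c
          · have hcnt' : 2 ≤ names.count c := hc ▸ hcnt
            simp [hc, hcnt, hcnt', hmem, List.mem_cons]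
          · simp [hc, hcnt, hmem, List.mem_cons]
      · have h1 : ¬ (names[j] ∈ cs ∧ 2 ≤ names.count names[j]) := fun h => hcnt h.2
        have h2 : ¬ (names[j] ∈ c :: cs ∧ 2 ≤ names.count names[j]) := fun h => hcnt h.2
        have h3 : ¬ (names[j] = c ∧ 2 ≤ names.count c) := by
          rintro ⟨e, h⟩; exact hcnt (e ▸ h)
        simp only [h1, h2, h3, if_neg, not_false_iff]

-- B's dict of positions: items = distinct names, each with its position list
lemma positions_items (names : List String) :
    ((PySem.List.enumerate names 0).foldl pvGroup PySem.Dict.empty).items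
      = (PySem.Set.ofList names).map (fun c => (c, pvIdxs names c 0)) := by
  have hshape : (PySem.List.enumerate names 0).foldl pvGroup PySem.Dict.empty
      = (PySem.List.enumerate names 0).foldl
          (fun d x => d.modify ((·.2) x) [] ((fun _ x => (· ++ [x.1])) d x)) PySem.Dict.empty := rfl
  have hnodup : ((PySem.List.enumerate names 0).foldl pvGroup PySem.Dict.empty).keys.Nodup := by
    rw [hshape]
    exact PySem.Dict.nodup_keys_foldl_modify_key _ _ _ _ _ (by simp)
  have hkeys : ((PySem.List.enumerate names 0).foldl pvGroup PySem.Dict.empty).keys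
      = PySem.Set.ofList names := by
    rw [hshape, PySem.Dict.keys_foldl_modify_key]
    rw [PySem.List.map_snd_enumerate]
    rfl
  have hgetD : ∀ c, ((PySem.List.enumerate names 0).foldl pvGroup PySem.Dict.empty).getD c []
      = pvIdxs names c 0 := by
    intro c
    have hmap : (PySem.List.enumerate names 0).foldl pvGroup PySem.Dict.empty
        = ((PySem.List.enumerate names 0).map (fun p => (p.2, p.1))).foldl
            (fun d p => d.modify p.1 [] (· ++ [p.2])) PySem.Dict.empty := by
      rw [List.foldl_map]; rfl
    rw [hmap, PySem.Dict.getD_foldl_modify_append]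
    simp only [PySem.Dict.getD_empty, List.nil_append]
    rw [List.filter_map]
    simp [pvIdxs, List.map_map, Function.comp_def]
  rw [PySem.Dict.items_eq_map_keys _ hnodup []]
  rw [hkeys]
  exact List.map_congr_left (fun c _ => by rw [hgetD c])

-- ===== VERDICT (by name: the statement is the Claim_ definition above) =====
theorem suffix_duplicates_spec : Claim_equal_suffix_duplicates := by
  intro names _
  unfold Spec_suffix_duplicates
  dsimp only [suffix_duplicates, suffix_duplicates_alt]
  rw [pass1_fold, positions_items]
  dsimp only
  rw [List.nil_append, patch_zip0 _ _ _ (length_pass1 _ _)]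
  apply List.ext_getElem
  · have h1 : ∀ (L : List (String × List Int)) (r : List String),
        (L.foldl pvScatter r).length = r.length := by
      intro L
      induction L with
      | nil => intro r; rfl
      | cons q L ih => intro r; rw [List.foldl_cons, ih, scatter_len]
    simp [length_pass1, h1]
  · intro i h1 h2
    rw [List.getElem_zipWith]
    rw [scatter_fold_get names (PySem.Set.ofList names) names rfl i
      (by simpa [length_pass1] using h1) h2]
    simp only [List.length_zipWith, length_pass1, Nat.min_self] at h1
    rw [pass1_get _ _ i (by omega)]
    have hcnt : (names.foldl pvStep PySem.Dict.empty).getD names[i] 0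
        = (names.count names[i] : Int) := by
      rw [show pvStep = (fun d x => d.modify x 0 (· + 1)) from rfl,
        PySem.Dict.getD_foldl_modify_add_one]
      simp
    rw [hcnt]
    have hmem : names[i] ∈ PySem.Set.ofList names := by
      rw [PySem.Set.mem_ofList]; exact List.getElem_mem _
    by_cases hge : 2 ≤ names.count names[i]
    · have h3 : ¬ (names.count names[i] : Int) < 2 := by push_cast; omega
      simp [h3, hmem, hge, PySem.Dict.getD_empty]
    · have h3 : (names.count names[i] : Int) < 2 := by push_cast; omega
      have hn2 : ¬ (names[i] ∈ PySem.Set.ofList names ∧ 2 ≤ names.count names[i]) :=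
        fun h => hge h.2
      simp [h3, hn2]
      intro hc
      exact absurd hc hge
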